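-- pv_equiv track=rewrite | github.com/Dpcrack22/2024-25 | Programacion/Programacion de repaso/Repaso 9 Recursividad.py | num_coincide_indice
-- ===== SOURCE A (Python) =====
-- def num_coincide_indice(lista):
--     resultado = False
--
--     if len(lista) == 0:
--         return resultado
--     if lista[-1] == len(lista) -1:
--         resultado = True
--     else:
--         resultado = num_coincide_indice(lista[:-1])
--     return resultado
-- ===== SOURCE B (Python) =====
-- def num_coincide_indice(lista):
--     return any(x == i for i, x in enumerate(lista))
-- ===== Notes on version B (the rewrite author's own statement) =====
-- stated objective: simpler
-- what changed: Replaced the tail-peeling slice recursion (which copies lista[:-1] at every step) with a single forward any() over enumerate, with no recursion and no list copies.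
import Mathlib
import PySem

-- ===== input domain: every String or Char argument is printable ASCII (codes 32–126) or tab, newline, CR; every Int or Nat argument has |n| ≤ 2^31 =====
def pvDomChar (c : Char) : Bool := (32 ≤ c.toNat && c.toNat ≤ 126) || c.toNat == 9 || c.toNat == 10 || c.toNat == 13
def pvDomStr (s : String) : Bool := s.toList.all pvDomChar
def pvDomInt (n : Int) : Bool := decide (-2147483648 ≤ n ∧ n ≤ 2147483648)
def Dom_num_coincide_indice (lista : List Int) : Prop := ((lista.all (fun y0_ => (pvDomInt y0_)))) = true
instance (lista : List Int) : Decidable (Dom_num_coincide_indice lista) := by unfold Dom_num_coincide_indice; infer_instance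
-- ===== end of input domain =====

-- ===== PORT A =====
-- A's value for lista[-1] (guarded: only read when lista is nonempty, so always in range)
def num_coincide_indice (lista : List Int) : Bool :=
  if lista.length = 0 then false
  else if PySem.List.pyGetD lista (-1) 0 = (lista.length : Int) - 1 then true
  else num_coincide_indice (PySem.List.slice lista none (some (-1)))
termination_by lista.length
decreasing_by
  simp_all [PySem.List.slice_to_neg_one]
  cases lista with
  | nil => simp_all
  | cons a as => simp

-- ===== PORT B =====
def num_coincide_indice_alt (lista : List Int) : Bool :=
  (PySem.List.enumerate lista 0).any (fun p => p.2 == p.1)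

-- ===== PRECONDITION & SPEC =====
def Spec_num_coincide_indice (lista : List Int) (out : Bool) : Prop := out = num_coincide_indice_alt lista
instance (lista : List Int) (out : Bool) : Decidable (Spec_num_coincide_indice lista out) := by unfold Spec_num_coincide_indice; infer_instance

-- ===== CLAIM (what is proved, stated in full; the proofs are below) =====
def Claim_equal_num_coincide_indice : Prop := ∀ (lista : List Int), Dom_num_coincide_indice lista → Spec_num_coincide_indice lista (num_coincide_indice lista)

-- ===== LEMMAS AND PROOFS =====

-- ===== VERDICT (by name: the statement is the Claim_ definition above) =====
lemma alt_concat (ys : List Int) (x : Int) :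
    num_coincide_indice_alt (ys ++ [x]) =
      (num_coincide_indice_alt ys || (x == (ys.length : Int))) := by
  simp [num_coincide_indice_alt, PySem.List.enumerate_append, PySem.List.enumerate_cons]

lemma a_eq_alt (lista : List Int) : num_coincide_indice lista = num_coincide_indice_alt lista := by
  induction lista using List.reverseRecOn with
  | nil => simp [num_coincide_indice, num_coincide_indice_alt]
  | append_singleton ys x ih =>
    rw [num_coincide_indice, alt_concat]
    simp [PySem.List.pyGetD_neg_one_append_singleton, PySem.List.slice_to_neg_one, ih]
    by_cases h : x = (ys.length : Int)
    · simp [h]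
    · simp [h]

theorem num_coincide_indice_spec : Claim_equal_num_coincide_indice := by
  intro lista _
  unfold Spec_num_coincide_indice
  exact a_eq_alt lista
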